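-- pv_equiv track=rewrite | github.com/papibe/flipflop-2025 | python/day02/part1.py | solve
-- ===== SOURCE A (Python) =====
-- UP: str = "^"
--
-- DOWN: str = "v"
--
-- def solve(data: str) -> int:
--     height: int = 0
--
--     max_height: int = 0
--     for char in data:
--         if char == UP:
--             height += 1
--         elif char == DOWN:
--             height -= 1
--
--         max_height = max(max_height, height)
--
--     return max_height
-- ===== SOURCE B (Python) =====
-- def solve(data: str) -> int:
--     # Right-to-left: m holds the max prefix height of the suffix already
--     # processed, via the identity maxprefix(c + s) = max(0, delta(c) + maxprefix(s)).
--     m = 0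
--     for c in reversed(data):
--         d = 1 if c == "^" else (-1 if c == "v" else 0)
--         m = max(0, d + m)
--     return m
-- ===== Notes on version B (the rewrite author's own statement) =====
-- stated objective: alternative
-- what changed: B traverses the string right-to-left with a single accumulator using the recurrence maxprefix(c+s) = max(0, delta(c) + maxprefix(s)); it never tracks the running height or any prefix sums, unlike A's left-to-right (height, max) loop.
import Mathlib
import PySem

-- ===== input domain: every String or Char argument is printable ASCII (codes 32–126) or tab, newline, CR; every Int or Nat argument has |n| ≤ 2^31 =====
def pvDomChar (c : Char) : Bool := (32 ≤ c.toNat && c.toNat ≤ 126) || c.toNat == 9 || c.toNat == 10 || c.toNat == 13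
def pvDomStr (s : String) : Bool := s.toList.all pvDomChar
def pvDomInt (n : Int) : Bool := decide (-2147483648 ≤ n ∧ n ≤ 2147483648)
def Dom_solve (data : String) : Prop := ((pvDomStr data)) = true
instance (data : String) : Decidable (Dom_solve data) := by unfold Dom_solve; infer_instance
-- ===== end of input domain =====

-- B scans the string right-to-left with one accumulator via maxprefix(c+s) = max(0, delta c + maxprefix s),
-- instead of A's left-to-right loop carrying (height, max_height); objective: alternative.


-- ===== PORT A =====
-- A: one left-to-right loop over the characters, updating height and max_height together.
def solve (data : String) : Int :=
  (data.toList.foldl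
    (fun (s : Int × Int) (c : Char) =>
      let height := if c = '^' then s.1 + 1 else if c = 'v' then s.1 - 1 else s.1
      (height, max s.2 height))
    (0, 0)).2

-- ===== PORT B =====
def solveDelta (c : Char) : Int :=
  if c = '^' then 1 else if c = 'v' then -1 else 0

-- B: fold over the REVERSED characters with one accumulator m = max prefix height of the
-- suffix processed so far: m := max 0 (delta c + m).
def solve_alt (data : String) : Int :=
  data.toList.reverse.foldl (fun (m : Int) (c : Char) => max 0 (solveDelta c + m)) 0

-- ===== PRECONDITION & SPEC =====
def Spec_solve (data : String) (out : Int) : Prop := out = solve_alt data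
instance (data : String) (out : Int) : Decidable (Spec_solve data out) := by unfold Spec_solve; infer_instance

-- ===== CLAIM (what is proved, stated in full; the proofs are below) =====
def Claim_equal_solve : Prop := ∀ (data : String), Dom_solve data → Spec_solve data (solve data)

-- ===== LEMMAS AND PROOFS =====

-- B's reversed foldl is the foldr of the same step over the original list.
theorem solve_alt_foldr (l : List Char) :
    l.reverse.foldl (fun (m : Int) (c : Char) => max 0 (solveDelta c + m)) 0
      = l.foldr (fun (c : Char) (m : Int) => max 0 (solveDelta c + m)) 0 := by
  rw [List.foldl_reverse]

-- B's foldr result is nonnegative.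
theorem solve_foldr_nonneg (l : List Char) :
    0 ≤ l.foldr (fun (c : Char) (m : Int) => max 0 (solveDelta c + m)) 0 := by
  cases l with
  | nil => simp
  | cons c t => simp [List.foldr_cons]

-- A's step applied to height h equals h + delta c.
theorem solve_step_delta (h : Int) (c : Char) :
    (if c = '^' then h + 1 else if c = 'v' then h - 1 else h) = h + solveDelta c := by
  unfold solveDelta; split_ifs <;> omega

-- Loop invariant: with h ≤ m, A's fused fold equals max m (h + B's foldr).
theorem solve_loop_inv (l : List Char) : ∀ (h m : Int), h ≤ m →
    (l.foldl
      (fun (s : Int × Int) (c : Char) =>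
        let height := if c = '^' then s.1 + 1 else if c = 'v' then s.1 - 1 else s.1
        (height, max s.2 height)) (h, m)).2
    = max m (h + l.foldr (fun (c : Char) (m : Int) => max 0 (solveDelta c + m)) 0) := by
  induction l with
  | nil => intro h m hm; simp; omega
  | cons c t ih =>
    intro h m hm
    simp only [List.foldl_cons, List.foldr_cons]
    rw [solve_step_delta]
    rw [ih (h + solveDelta c) (max m (h + solveDelta c)) (le_max_right _ _)]
    have hn := solve_foldr_nonneg t
    omega

-- ===== VERDICT (by name: the statement is the Claim_ definition above) =====
theorem solve_spec : Claim_equal_solve := by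
  intro data _
  unfold Spec_solve solve solve_alt
  rw [solve_alt_foldr, solve_loop_inv data.toList 0 0 le_rfl]
  have := solve_foldr_nonneg data.toList
  omega
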